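-- pv_equiv track=rewrite | github.com/SAA9/NLP-Project | processor.py | build_metrics_dictionary
-- ===== SOURCE A (Python) =====
-- languages = ['eu', 'ca', 'gl', 'es', 'en', 'pt']
--
-- def build_metrics_dictionary(result_tuple):
--     metrics_dictionary = {}
--
--     for language in languages:
--         for _, correct_language, likely_language, _ in result_tuple:
--             True_Positive = 0
--             False_Positive = 0
--             False_Negative = 0
--
--             if (correct_language==language and likely_language==language):
--                 True_Positive = 1
--
--             elif (correct_language==language and likely_language!=language):
--                 False_Negative = 1
--
--             elif (correct_language!=language and likely_language==language):
--                 False_Positive = 1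
--
--             if (language in metrics_dictionary):
--                 metrics_dictionary[language] = (metrics_dictionary[language][0] + True_Positive, metrics_dictionary[language][1] + False_Positive, metrics_dictionary[language][2] + False_Negative)
--             else:
--                 metrics_dictionary[language] = (True_Positive, False_Positive, False_Negative)
--
--     return metrics_dictionary
-- ===== SOURCE B (Python) =====
-- languages = ['eu', 'ca', 'gl', 'es', 'en', 'pt']
--
-- def build_metrics_dictionary(result_tuple):
--     counts = {lang: (0, 0, 0) for lang in languages}
--     for _, correct, likely, _ in result_tuple:
--         if correct == likely:
--             if correct in counts:
--                 tp, fp, fn = counts[correct]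
--                 counts[correct] = (tp + 1, fp, fn)
--         else:
--             if correct in counts:
--                 tp, fp, fn = counts[correct]
--                 counts[correct] = (tp, fp, fn + 1)
--             if likely in counts:
--                 tp, fp, fn = counts[likely]
--                 counts[likely] = (tp, fp + 1, fn)
--     return counts
-- ===== Notes on version B (the rewrite author's own statement) =====
-- stated objective: simpler
-- what changed: A loops over the whole result list once per language (six passes), recomputing and reinserting each dict entry item by item; B seeds a dict with all six languages at (0,0,0) and makes a single pass over the results, bumping TP/FP/FN of the affected languages.
-- intended difference: On the empty input A returns {} with no language keys (its inner loop never runs), while B returns all six languages mapped to (0,0,0), the intended value since every non-empty input yields exactly these six keys. — e.g. on build_metrics_dictionary([]): A returns [], B returns [("eu", 0, 0, 0), ("ca", 0, 0, 0), ("gl", 0, 0, 0), ("es", 0, 0, 0), ("en", 0, 0, 0), ("pt", 0, 0, 0)]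
import Mathlib
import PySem

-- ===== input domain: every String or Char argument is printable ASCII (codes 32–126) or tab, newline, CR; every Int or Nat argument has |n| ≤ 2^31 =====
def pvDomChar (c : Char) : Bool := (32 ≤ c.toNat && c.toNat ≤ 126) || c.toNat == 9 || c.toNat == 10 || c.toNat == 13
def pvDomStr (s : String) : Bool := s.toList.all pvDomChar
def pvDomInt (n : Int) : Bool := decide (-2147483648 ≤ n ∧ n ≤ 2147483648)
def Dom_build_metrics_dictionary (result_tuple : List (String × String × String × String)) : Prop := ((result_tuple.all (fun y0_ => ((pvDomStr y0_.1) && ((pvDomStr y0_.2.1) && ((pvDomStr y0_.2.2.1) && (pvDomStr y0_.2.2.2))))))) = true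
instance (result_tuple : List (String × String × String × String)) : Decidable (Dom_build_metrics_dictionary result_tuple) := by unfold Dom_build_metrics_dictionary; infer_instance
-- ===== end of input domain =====

-- B replaces A's six passes over the data (one per language, rebuilding the dict entry at every
-- item) by a dict of six pre-seeded zero counters updated in one pass; on the empty input B keeps
-- the six zeroed keys where A returns {} (the intended difference stated as D_ below).

def pvLanguages : List String := ["eu", "ca", "gl", "es", "en", "pt"]

-- ===== PORT A =====
def build_metrics_dictionary (result_tuple : List (String × String × String × String)) : List (String × Int × Int × Int) :=
  (pvLanguages.foldl (fun md language =>
    result_tuple.foldl (fun md it =>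
      let correct_language := it.2.1
      let likely_language := it.2.2.1
      -- the three counters, one of them set to 1 by the if/elif chain
      let tfn : Int × Int × Int :=
        if correct_language == language && likely_language == language then (1, 0, 0)
        else if correct_language == language && !(likely_language == language) then (0, 0, 1)
        else if !(correct_language == language) && likely_language == language then (0, 1, 0)
        else (0, 0, 0)
      if md.contains language then
        let v := md.getD language ((0 : Int), (0 : Int), (0 : Int))
        md.insert language (v.1 + tfn.1, v.2.1 + tfn.2.1, v.2.2 + tfn.2.2)
      else
        md.insert language tfn) md)
    PySem.Dict.empty).items

-- ===== PORT B =====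
def build_metrics_dictionary_alt (result_tuple : List (String × String × String × String)) : List (String × Int × Int × Int) :=
  let counts : PySem.Dict String (Int × Int × Int) :=
    pvLanguages.foldl (fun d lang => d.insert lang ((0 : Int), (0 : Int), (0 : Int))) PySem.Dict.empty
  (result_tuple.foldl (fun d it =>
      let correct := it.2.1
      let likely := it.2.2.1
      if correct == likely then
        if d.contains correct then d.modify correct (0, 0, 0) (fun v => (v.1 + 1, v.2.1, v.2.2)) else d
      else
        let d := if d.contains correct then d.modify correct (0, 0, 0) (fun v => (v.1, v.2.1, v.2.2 + 1)) else d
        if d.contains likely then d.modify likely (0, 0, 0) (fun v => (v.1, v.2.1 + 1, v.2.2)) else d)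
    counts).items

-- ===== PRECONDITION & SPEC =====
-- On the empty input A returns {} (its inner loop never runs, so no language key is ever created),
-- while B returns all six languages with (0, 0, 0) counts — the intended value, since every
-- non-empty input yields exactly these six keys and callers expect every language's metrics present.
def D_build_metrics_dictionary (result_tuple : List (String × String × String × String)) : Prop :=
  result_tuple.isEmpty = true
instance (result_tuple : List (String × String × String × String)) : Decidable (D_build_metrics_dictionary result_tuple) := by unfold D_build_metrics_dictionary; infer_instance

def Spec_build_metrics_dictionary (result_tuple : List (String × String × String × String)) (out : List (String × Int × Int × Int)) : Prop := ¬ D_build_metrics_dictionary result_tuple → out = build_metrics_dictionary_alt result_tuple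
instance (result_tuple : List (String × String × String × String)) (out : List (String × Int × Int × Int)) : Decidable (Spec_build_metrics_dictionary result_tuple out) := by unfold Spec_build_metrics_dictionary; infer_instance

def pvDiffWitness_build_metrics_dictionary : (List (String × String × String × String)) := []
def pvDiffWitnessOut_build_metrics_dictionary : (List (String × Int × Int × Int)) × (List (String × Int × Int × Int)) :=
  ([], [("eu", 0, 0, 0), ("ca", 0, 0, 0), ("gl", 0, 0, 0), ("es", 0, 0, 0), ("en", 0, 0, 0), ("pt", 0, 0, 0)])

-- ===== CLAIM (what is proved, stated in full; the proofs are below) =====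
def Claim_unchanged_build_metrics_dictionary : Prop := ∀ (result_tuple : List (String × String × String × String)), Dom_build_metrics_dictionary result_tuple → Spec_build_metrics_dictionary result_tuple (build_metrics_dictionary result_tuple)
def Claim_changed_build_metrics_dictionary : Prop := Dom_build_metrics_dictionary (pvDiffWitness_build_metrics_dictionary) ∧ D_build_metrics_dictionary (pvDiffWitness_build_metrics_dictionary) ∧ build_metrics_dictionary (pvDiffWitness_build_metrics_dictionary) = pvDiffWitnessOut_build_metrics_dictionary.1 ∧ build_metrics_dictionary_alt (pvDiffWitness_build_metrics_dictionary) = pvDiffWitnessOut_build_metrics_dictionary.2 ∧ pvDiffWitnessOut_build_metrics_dictionary.1 ≠ pvDiffWitnessOut_build_metrics_dictionary.2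
def Claim_exact_build_metrics_dictionary : Prop := ∀ (result_tuple : List (String × String × String × String)), Dom_build_metrics_dictionary result_tuple → D_build_metrics_dictionary result_tuple → build_metrics_dictionary result_tuple ≠ build_metrics_dictionary_alt result_tuple

-- ===== LEMMAS AND PROOFS =====

-- the per-item counter delta for one language, exactly as A's if/elif chain computes it
def pvDelta (l : String) (it : String × String × String × String) : Int × Int × Int :=
  if it.2.1 == l && it.2.2.1 == l then (1, 0, 0)
  else if it.2.1 == l && !(it.2.2.1 == l) then (0, 0, 1)
  else if !(it.2.1 == l) && it.2.2.1 == l then (0, 1, 0)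
  else (0, 0, 0)

def pvAdd (a b : Int × Int × Int) : Int × Int × Int := (a.1 + b.1, a.2.1 + b.2.1, a.2.2 + b.2.2)

def pvCnt (l : String) (rt : List (String × String × String × String)) (acc : Int × Int × Int) : Int × Int × Int :=
  rt.foldl (fun a it => pvAdd a (pvDelta l it)) acc

-- A's inner-loop body, definitionally equal to the lambda in the port
def pvStepA (language : String) (md : PySem.Dict String (Int × Int × Int)) (it : String × String × String × String) : PySem.Dict String (Int × Int × Int) :=
  let correct_language := it.2.1
  let likely_language := it.2.2.1
  let tfn : Int × Int × Int :=
    if correct_language == language && likely_language == language then (1, 0, 0)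
    else if correct_language == language && !(likely_language == language) then (0, 0, 1)
    else if !(correct_language == language) && likely_language == language then (0, 1, 0)
    else (0, 0, 0)
  if md.contains language then
    let v := md.getD language ((0 : Int), (0 : Int), (0 : Int))
    md.insert language (v.1 + tfn.1, v.2.1 + tfn.2.1, v.2.2 + tfn.2.2)
  else
    md.insert language tfn

-- B's loop body, definitionally equal to the lambda in the port
def pvStepB (d : PySem.Dict String (Int × Int × Int)) (it : String × String × String × String) : PySem.Dict String (Int × Int × Int) :=
  let correct := it.2.1
  let likely := it.2.2.1
  if correct == likely then
    if d.contains correct then d.modify correct (0, 0, 0) (fun v => (v.1 + 1, v.2.1, v.2.2)) else d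
  else
    let d := if d.contains correct then d.modify correct (0, 0, 0) (fun v => (v.1, v.2.1, v.2.2 + 1)) else d
    if d.contains likely then d.modify likely (0, 0, 0) (fun v => (v.1, v.2.1 + 1, v.2.2)) else d

def pvSeedDict : PySem.Dict String (Int × Int × Int) :=
  pvLanguages.foldl (fun d lang => d.insert lang ((0 : Int), (0 : Int), (0 : Int))) PySem.Dict.empty

theorem pv_portA_eq (rt : List (String × String × String × String)) :
    build_metrics_dictionary rt
      = (pvLanguages.foldl (fun md language => rt.foldl (pvStepA language) md) PySem.Dict.empty).items := rfl

theorem pv_portB_eq (rt : List (String × String × String × String)) :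
    build_metrics_dictionary_alt rt = (rt.foldl pvStepB pvSeedDict).items := rfl

theorem pv_stepA_eq (l : String) (d : PySem.Dict String (Int × Int × Int)) (it : String × String × String × String) :
    pvStepA l d it = d.insert l (pvAdd (d.getD l (0, 0, 0)) (pvDelta l it)) := by
  simp only [pvStepA, pvAdd, pvDelta]
  by_cases h : d.contains l
  · rw [if_pos h]
    try split_ifs <;> rfl
  · have hf : d.contains l = false := by simpa using h
    rw [if_neg h, PySem.Dict.getD_of_not_contains _ _ hf]
    try split_ifs <;> rfl

theorem pv_foldA (l : String) (rt : List (String × String × String × String)) :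
    ∀ (it : String × String × String × String) (d : PySem.Dict String (Int × Int × Int)),
      List.foldl (pvStepA l) (pvStepA l d it) rt = d.insert l (pvCnt l (it :: rt) (d.getD l (0, 0, 0))) := by
  induction rt with
  | nil =>
    intro it d
    rw [List.foldl_nil, pv_stepA_eq]
    rfl
  | cons jt rest ih =>
    intro it d
    rw [List.foldl_cons, ih jt (pvStepA l d it), pv_stepA_eq l d it, PySem.Dict.getD_insert_self,
      PySem.Dict.insert_insert_self]
    rfl

theorem pv_stepB_getD (l : String) (d : PySem.Dict String (Int × Int × Int)) (it : String × String × String × String)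
    (hl : d.contains l = true) :
    (pvStepB d it).getD l (0, 0, 0) = pvAdd (d.getD l (0, 0, 0)) (pvDelta l it) := by
  simp only [pvStepB, pvAdd, pvDelta, beq_iff_eq]
  by_cases hc : l = it.2.1 <;> by_cases hk : l = it.2.2.1 <;>
    split_ifs <;>
    simp_all [PySem.Dict.getD_modify, PySem.Dict.getD_modify_self, PySem.Dict.contains_modify,
      PySem.Dict.getD_of_not_contains]

theorem pv_stepB_keys (d : PySem.Dict String (Int × Int × Int)) (it : String × String × String × String) :
    (pvStepB d it).keys = d.keys := by
  simp only [pvStepB, beq_iff_eq]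
  split_ifs <;>
    simp_all [PySem.Dict.keys_modify, PySem.Dict.keys_insert_of_contains, PySem.Dict.contains_modify]

theorem pv_stepB_contains (d : PySem.Dict String (Int × Int × Int)) (it : String × String × String × String)
    (l : String) (hl : d.contains l = true) : (pvStepB d it).contains l = true := by
  rw [PySem.Dict.contains_iff_mem_keys] at hl ⊢
  rw [pv_stepB_keys]
  exact hl

theorem pv_foldB_keys (rt : List (String × String × String × String)) :
    ∀ d : PySem.Dict String (Int × Int × Int), (rt.foldl pvStepB d).keys = d.keys := by
  induction rt with
  | nil => intro d; rfl
  | cons it rest ih =>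
    intro d
    rw [List.foldl_cons, ih, pv_stepB_keys]

theorem pv_foldB_getD (l : String) (rt : List (String × String × String × String)) :
    ∀ d : PySem.Dict String (Int × Int × Int), d.contains l = true →
      (rt.foldl pvStepB d).getD l (0, 0, 0) = pvCnt l rt (d.getD l (0, 0, 0)) := by
  induction rt with
  | nil => intro d _; rfl
  | cons it rest ih =>
    intro d hl
    rw [List.foldl_cons, ih _ (pv_stepB_contains d it l hl), pv_stepB_getD l d it hl]
    rfl

-- ===== VERDICT (by name: the statement is the Claim_ definition above) =====
theorem build_metrics_dictionary_spec : Claim_unchanged_build_metrics_dictionary := by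
  intro rt _ hD
  have hne : rt ≠ [] := by
    simpa [D_build_metrics_dictionary, List.isEmpty_iff] using hD
  obtain ⟨it, rest, rfl⟩ := List.exists_cons_of_ne_nil hne
  rw [pv_portA_eq, pv_portB_eq]
  -- B side: items of the one-pass fold over the seeded dict
  have hk := pv_foldB_keys (it :: rest) pvSeedDict
  have hnd : ((it :: rest).foldl pvStepB pvSeedDict).keys.Nodup := by
    rw [hk]; decide
  rw [PySem.Dict.items_eq_map_keys _ hnd (0, 0, 0), hk,
    (by decide : pvSeedDict.keys = ["eu", "ca", "gl", "es", "en", "pt"])]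
  simp only [List.map]
  rw [pv_foldB_getD "eu" (it :: rest) pvSeedDict (by decide),
      pv_foldB_getD "ca" (it :: rest) pvSeedDict (by decide),
      pv_foldB_getD "gl" (it :: rest) pvSeedDict (by decide),
      pv_foldB_getD "es" (it :: rest) pvSeedDict (by decide),
      pv_foldB_getD "en" (it :: rest) pvSeedDict (by decide),
      pv_foldB_getD "pt" (it :: rest) pvSeedDict (by decide)]
  -- A side: six successive insertions of the per-language counts into the empty dict
  simp only [pvLanguages, List.foldl_cons, List.foldl_nil]
  rw [pv_foldA "eu" rest it, pv_foldA "ca" rest it, pv_foldA "gl" rest it,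
      pv_foldA "es" rest it, pv_foldA "en" rest it, pv_foldA "pt" rest it]
  -- reduce all literal-key lookups, membership tests and the items of the insert chain
  simp [PySem.Dict.getD_insert, PySem.Dict.getD_empty, PySem.Dict.items_insert_of_not_contains,
    PySem.Dict.contains_insert, PySem.Dict.contains_empty, PySem.Dict.empty, PySem.Dict.items,
    pvSeedDict, pvLanguages, List.foldl_cons, List.foldl_nil, PySem.Dict.getD_insert_self]
  exact ⟨rfl, rfl, rfl, rfl, rfl, rfl⟩

theorem build_metrics_dictionary_changed : Claim_changed_build_metrics_dictionary := by
  unfold Claim_changed_build_metrics_dictionary; decide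

theorem build_metrics_dictionary_tight : Claim_exact_build_metrics_dictionary := by
  intro rt _ hD
  have h : rt = [] := by simpa [D_build_metrics_dictionary, List.isEmpty_iff] using hD
  subst h
  decide
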